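-- pv_equiv track=rewrite | github.com/sauravpanda/find-pickleball-court-sf | src/court_availability.py | _extract_time_ranges
-- ===== SOURCE A (Python) =====
-- from typing import Any, Dict, List, Optional
--
-- def _extract_time_ranges(times: List[str]) -> List[tuple]:
--     """Extract time ranges from a list of times.
--
--     Args:
--         times: List of times in HH:MM format
--
--     Returns:
--         List of (start_time, end_time) tuples in minutes since midnight
--     """
--     # Convert times to minutes since midnight for easier comparison
--     minutes = []
--     for t in times:
--         try:
--             hours, mins = map(int, t.split(':'))
--             minutes.append(hours * 60 + mins)
--         except (ValueError, IndexError):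
--             continue
--
--     # Sort minutes
--     minutes.sort()
--
--     # Find continuous ranges
--     ranges = []
--     start = None
--     prev = None
--
--     for m in minutes:
--         if start is None:
--             start = m
--             prev = m
--         elif m - prev > 60:  # If more than 1 hour gap, start a new range
--             ranges.append((start, prev))
--             start = m
--             prev = m
--         else:
--             prev = m
--
--     # Add the last range
--     if start is not None:
--         ranges.append((start, prev))
--
--     return ranges
-- ===== SOURCE B (Python) =====
-- from typing import List, Optional
--
--
-- def _parse_minutes(t: str) -> Optional[int]:
--     """Minutes since midnight for an 'H:M' string, None if it does not parse."""
--     parts = t.split(':')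
--     if len(parts) != 2:
--         return None
--     try:
--         h = int(parts[0])
--         m = int(parts[1])
--     except ValueError:
--         return None
--     return h * 60 + m
--
--
-- def _run(start: int, prev: int, ms: List[int]) -> List[tuple]:
--     """Ranges of ms given an open range [start, prev] being extended."""
--     if not ms:
--         return [(start, prev)]
--     m, tail = ms[0], ms[1:]
--     if m - prev > 60:
--         return [(start, prev)] + _run(m, m, tail)
--     return _run(start, m, tail)
--
--
-- def _extract_time_ranges(times: List[str]) -> List[tuple]:
--     minutes = sorted(m for m in (_parse_minutes(t) for t in times) if m is not None)
--     if not minutes: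
--         return []
--     return _run(minutes[0], minutes[0], minutes[1:])
-- ===== Notes on version B (the rewrite author's own statement) =====
-- stated objective: simpler
-- what changed: Replaces A's single loop threading Optional start/prev state plus a trailing flush-append with a tail parse helper and a structural recursion over the sorted list that emits each (start,prev) range at its natural end, so no None-sentinel state or final append is needed.
import Mathlib
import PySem

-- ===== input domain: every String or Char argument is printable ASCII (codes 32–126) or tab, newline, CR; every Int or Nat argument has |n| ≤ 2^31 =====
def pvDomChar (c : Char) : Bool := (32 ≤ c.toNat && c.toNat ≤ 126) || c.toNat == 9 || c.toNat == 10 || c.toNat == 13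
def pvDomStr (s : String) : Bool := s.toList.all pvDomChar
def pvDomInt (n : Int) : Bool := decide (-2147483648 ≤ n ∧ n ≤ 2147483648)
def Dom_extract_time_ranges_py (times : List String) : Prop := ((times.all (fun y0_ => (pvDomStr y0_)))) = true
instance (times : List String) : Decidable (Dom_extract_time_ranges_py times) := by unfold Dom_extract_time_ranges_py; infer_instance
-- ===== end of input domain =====

-- B replaces A's Optional start/prev loop state and trailing flush-append with a
-- structural recursion over the sorted list (objective: simpler decomposition).

-- ===== PORT A =====
-- Parse loop: 'hours, mins = map(int, t.split(':'))' succeeds exactly when the split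
-- has two parts and both parse as int; otherwise ValueError is raised and caught
-- (IndexError never occurs), so the element is skipped. Exact on that behaviour.
def pvStepA (acc : List Int) (t : String) : List Int :=
  match PySem.Str.split? t ":" with
  | some [a, b] =>
    match PySem.Int.ofStr? a, PySem.Int.ofStr? b with
    | some h, some m => acc ++ [h * 60 + m]
    | _, _ => acc
  | _ => acc

def pvLoopA (st : List (Int × Int) × Option Int × Option Int) (m : Int) :
    List (Int × Int) × Option Int × Option Int :=
  match st with
  | (ranges, none, _) => (ranges, some m, some m)
  | (ranges, some s, none) => (ranges, some s, some m)      -- unreachable in the loop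
  | (ranges, some s, some p) =>
    if m - p > 60 then (ranges ++ [(s, p)], some m, some m)
    else (ranges, some s, some m)

def extract_time_ranges_py (times : List String) : List (Int × Int) :=
  let minutes := times.foldl pvStepA []
  let minutes := PySem.List.sorted minutes (fun x => x) false
  let res := minutes.foldl pvLoopA ([], none, none)
  match res.2.1, res.2.2 with
  | some s, some p => res.1 ++ [(s, p)]
  | _, _ => res.1

-- ===== PORT B =====
def pvParseMinutes (t : String) : Option Int :=
  match PySem.Str.split? t ":" with
  | some [a, b] =>
    match PySem.Int.ofStr? a, PySem.Int.ofStr? b with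
    | some h, some m => some (h * 60 + m)
    | _, _ => none
  | _ => none

def pvRunB (start prev : Int) : List Int → List (Int × Int)
  | [] => [(start, prev)]
  | m :: tail =>
    if m - prev > 60 then (start, prev) :: pvRunB m m tail
    else pvRunB start m tail

def extract_time_ranges_py_alt (times : List String) : List (Int × Int) :=
  match PySem.List.sorted (times.filterMap pvParseMinutes) (fun x => x) false with
  | [] => []
  | m :: rest => pvRunB m m rest

-- ===== PRECONDITION & SPEC =====
def Spec_extract_time_ranges_py (times : List String) (out : List (Int × Int)) : Prop := out = extract_time_ranges_py_alt times
instance (times : List String) (out : List (Int × Int)) : Decidable (Spec_extract_time_ranges_py times out) := by unfold Spec_extract_time_ranges_py; infer_instance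

-- ===== CLAIM (what is proved, stated in full; the proofs are below) =====
def Claim_equal_extract_time_ranges_py : Prop := ∀ (times : List String), Dom_extract_time_ranges_py times → Spec_extract_time_ranges_py times (extract_time_ranges_py times)

-- ===== LEMMAS AND PROOFS =====

theorem pvStepA_eq (acc : List Int) (t : String) :
    pvStepA acc t = acc ++ (pvParseMinutes t).toList := by
  unfold pvStepA pvParseMinutes
  rcases h : PySem.Str.split? t ":" with _ | ⟨_ | ⟨a, _ | ⟨b, _ | _⟩⟩⟩ <;> simp
  rcases PySem.Int.ofStr? a with _ | h' <;> rcases PySem.Int.ofStr? b with _ | m' <;> simp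

theorem minutes_eq (times : List String) (acc : List Int) :
    times.foldl pvStepA acc = acc ++ times.filterMap pvParseMinutes := by
  induction times generalizing acc with
  | nil => simp
  | cons t ts ih =>
    simp only [List.foldl_cons, List.filterMap_cons, ih, pvStepA_eq]
    rcases pvParseMinutes t with _ | v <;> simp

theorem loop_eq (ms : List Int) (ranges : List (Int × Int)) (s p : Int) :
    (match (ms.foldl pvLoopA (ranges, some s, some p)).2.1,
           (ms.foldl pvLoopA (ranges, some s, some p)).2.2 with
      | some s', some p' => (ms.foldl pvLoopA (ranges, some s, some p)).1 ++ [(s', p')]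
      | _, _ => (ms.foldl pvLoopA (ranges, some s, some p)).1) = ranges ++ pvRunB s p ms := by
  induction ms generalizing ranges s p with
  | nil => simp [pvRunB]
  | cons m tail ih =>
    simp only [List.foldl_cons, pvLoopA, pvRunB]
    by_cases h : m - p > 60
    · simp only [if_pos h, ih]; simp
    · simp only [if_neg h, ih]

theorem extract_time_ranges_py_spec' (times : List String) :
    extract_time_ranges_py times = extract_time_ranges_py_alt times := by
  unfold extract_time_ranges_py extract_time_ranges_py_alt
  rw [minutes_eq times []]
  simp only [List.nil_append]
  rcases h : PySem.List.sorted (times.filterMap pvParseMinutes) (fun x => x) false with _ | ⟨m, rest⟩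
  · rfl
  · have := loop_eq rest [] m m
    simpa [List.foldl_cons, pvLoopA] using this

-- ===== VERDICT (by name: the statement is the Claim_ definition above) =====
theorem extract_time_ranges_py_spec : Claim_equal_extract_time_ranges_py := by
  intro times _
  exact extract_time_ranges_py_spec' times
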